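-- pv_equiv track=rewrite | github.com/omerpaz1/facebook_simulation | BaseMonte.py | getChlids
-- ===== SOURCE A (Python) =====
-- import itertools
--
-- def getChlids(po):
--     anslist = []
--     mylist = []
--     for o in po:
--         l = []
--         for key,value in o.items():
--             l.append(key)
--         mylist.append(l)
--
--     for element in itertools.product(*mylist):
--         anslist.append(element)
--     return anslist
-- ===== SOURCE B (Python) =====
-- def getChlids(po):
--     keylists = [list(o) for o in po]
--     radices = [len(ks) for ks in keylists]
--     total = 1
--     for r in radices:
--         total *= r
--     anslist = []
--     for i in range(total):
--         rem = i
--         tup = []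
--         for j in range(len(keylists) - 1, -1, -1):
--             rem, d = divmod(rem, radices[j])
--             tup.append(keylists[j][d])
--         anslist.append(tuple(reversed(tup)))
--     return anslist
-- ===== Notes on version B (the rewrite author's own statement) =====
-- stated objective: alternative
-- what changed: Replaces the itertools.product iteration with mixed-radix index decoding: B computes the total count as the product of key-list lengths and, for each index i in range(total), decodes i's mixed-radix digits (rightmost pool fastest) to pick the keys, never building partial products.
import Mathlib
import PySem

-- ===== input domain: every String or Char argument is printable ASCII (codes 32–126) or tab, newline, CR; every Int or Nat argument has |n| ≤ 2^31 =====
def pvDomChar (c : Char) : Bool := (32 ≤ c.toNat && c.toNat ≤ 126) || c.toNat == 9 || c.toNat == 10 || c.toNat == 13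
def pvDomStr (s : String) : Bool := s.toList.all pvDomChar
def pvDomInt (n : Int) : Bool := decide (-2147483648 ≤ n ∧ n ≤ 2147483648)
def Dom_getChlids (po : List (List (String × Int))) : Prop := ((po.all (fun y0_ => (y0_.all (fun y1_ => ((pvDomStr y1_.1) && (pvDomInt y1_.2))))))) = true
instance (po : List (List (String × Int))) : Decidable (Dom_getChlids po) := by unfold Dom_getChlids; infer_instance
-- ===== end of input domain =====

-- B replaces itertools.product with mixed-radix index decoding: total = product of
-- key-list lengths, each index i in range(total) is decoded into digits selecting
-- the keys (rightmost pool fastest); same cost, a different algorithm.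


-- ===== PORT A =====
-- itertools.product(*mylist): the standard recursion over the list of pools
def pyProduct (ls : List (List String)) : List (List String) :=
  match ls with
  | [] => [[]]
  | l :: ls => l.flatMap (fun k => (pyProduct ls).map (fun rest => k :: rest))

def getChlids (po : List (List (String × Int))) : List (List String) :=
  -- mylist: for each dict o, loop over o.items() appending the key
  let mylist := po.foldl (fun acc o =>
    acc ++ [(PySem.Dict.ofList o).items.foldl (fun l kv => l ++ [kv.1]) []]) []
  -- for element in itertools.product(*mylist): anslist.append(element)
  (pyProduct mylist).foldl (fun ans e => ans ++ [e]) []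

-- ===== PORT B =====
-- one step of Source B's inner loop (j descending): rem, d = divmod(rem, radices[j]);
-- tup.append(keylists[j][d]).  rem and the radices are nonnegative, so Python's
-- divmod is exactly Nat division/modulo; the index d = rem % r is in range whenever
-- the loop runs (total > 0 forces every radix > 0), so getD's default is a mere
-- totality guard.
def pvStep (st : Nat × List String) (kr : List String × Nat) : Nat × List String :=
  (st.1 / kr.2, st.2 ++ [kr.1.getD (st.1 % kr.2) ""])

-- the inner j-loop over the pairs in reverse, then tuple(reversed(tup))
def pvDecode (pairs : List (List String × Nat)) (i : Nat) : List String :=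
  ((pairs.reverse.foldl pvStep (i, [])).2).reverse

def getChlids_alt (po : List (List (String × Int))) : List (List String) :=
  let keylists := po.map (fun o => (PySem.Dict.ofList o).keys)
  let radices := keylists.map List.length
  let total := radices.foldl (· * ·) 1
  (List.range total).map (fun i => pvDecode (keylists.zip radices) i)

-- ===== PRECONDITION & SPEC =====
def Spec_getChlids (po : List (List (String × Int))) (out : List (List String)) : Prop := out = getChlids_alt po
instance (po : List (List (String × Int))) (out : List (List String)) : Decidable (Spec_getChlids po out) := by unfold Spec_getChlids; infer_instance

-- ===== CLAIM (what is proved, stated in full; the proofs are below) =====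
def Claim_equal_getChlids : Prop := ∀ (po : List (List (String × Int))), Dom_getChlids po → Spec_getChlids po (getChlids po)

-- ===== LEMMAS AND PROOFS =====

-- A's inner key loop builds exactly the dict's keys list
lemma keys_loop (o : List (String × Int)) :
    (PySem.Dict.ofList o).items.foldl (fun l kv => l ++ [kv.1]) [] = (PySem.Dict.ofList o).keys := by
  rw [PySem.List.foldl_append_singleton_eq_map (fun kv : String × Int => kv.1)]
  rfl

lemma mylist_eq (po : List (List (String × Int))) :
    po.foldl (fun acc o =>
      acc ++ [(PySem.Dict.ofList o).items.foldl (fun l kv => l ++ [kv.1]) []]) []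
      = po.map (fun o => (PySem.Dict.ofList o).keys) := by
  rw [PySem.List.foldl_append_singleton_eq_map
        (fun o : List (String × Int) => (PySem.Dict.ofList o).items.foldl (fun l kv => l ++ [kv.1]) [])]
  simp only [List.nil_append]
  exact List.map_congr_left (fun o _ => keys_loop o)

-- pyProduct peeled from the right
lemma pyProduct_concat (ls : List (List String)) (l : List String) :
    pyProduct (ls ++ [l]) = (pyProduct ls).flatMap (fun p => l.map (fun k => p ++ [k])) := by
  induction ls with
  | nil =>
    simp only [List.nil_append, pyProduct]
    induction l with
    | nil => rfl
    | cons a l ihl => simp_all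
  | cons a ls ih =>
    simp only [List.cons_append, pyProduct, ih]
    simp [Function.comp_def, List.map_flatMap, List.flatMap_assoc, List.flatMap_map, List.map_map]

-- the fold's accumulator only grows on the right
lemma foldl_step_acc (rs : List (List String × Nat)) :
    ∀ (i : Nat) (acc : List String),
      rs.foldl pvStep (i, acc)
        = ((rs.foldl pvStep (i, [])).1, acc ++ (rs.foldl pvStep (i, [])).2) := by
  induction rs with
  | nil => intro i acc; simp
  | cons r rs ih =>
    intro i acc
    simp only [List.foldl_cons, pvStep]
    rw [ih (i / r.2) (acc ++ [r.1.getD (i % r.2) ""]),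
        ih (i / r.2) ([] ++ [r.1.getD (i % r.2) ""])]
    simp

lemma zip_lengths (ls : List (List String)) :
    ls.zip (ls.map List.length) = ls.map (fun l => (l, l.length)) := by
  induction ls with
  | nil => rfl
  | cons a ls ih => simp [ih]

lemma pvDecode_concat (ls : List (List String)) (l : List String) (i : Nat) :
    pvDecode ((ls ++ [l]).map (fun l' => (l', l'.length))) i
      = pvDecode (ls.map (fun l' => (l', l'.length))) (i / l.length)
        ++ [l.getD (i % l.length) ""] := by
  unfold pvDecode
  simp only [List.map_append, List.map_cons, List.map_nil, List.reverse_append,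
    List.reverse_cons, List.reverse_nil, List.nil_append, List.cons_append,
    List.foldl_cons, pvStep]
  rw [foldl_step_acc _ (i / l.length) [l.getD (i % l.length) ""]]
  simp

-- enumerating a list by index
lemma map_getD_range {α : Type} (l : List α) (d : α) :
    (List.range l.length).map (fun i => l.getD i d) = l := by
  induction l with
  | nil => rfl
  | cons a l ih =>
    simp only [List.length_cons, List.range_succ_eq_map, List.map_cons, List.map_map]
    simpa [Function.comp] using ih

-- decomposing range (T * r) into quotient/remainder
lemma range_mul_decode {α : Type} (T r : Nat) (g : Nat → Nat → α) :
    (List.range (T * r)).map (fun i => g (i / r) (i % r))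
      = (List.range T).flatMap (fun q => (List.range r).map (fun d => g q d)) := by
  rcases Nat.eq_zero_or_pos r with hr | hr
  · subst hr; simp
  induction T with
  | zero => simp
  | succ T ih =>
    rw [Nat.succ_mul, List.range_add, List.range_succ]
    simp only [List.map_append, List.flatMap_append, ih, List.map_map, List.flatMap_cons,
      List.flatMap_nil, List.append_nil]
    congr 1
    refine List.map_congr_left ?_
    intro d hd
    have hd' : d < r := List.mem_range.mp hd
    simp [Function.comp, Nat.add_mul_div_right _ _ hr, Nat.div_eq_of_lt hd',
      Nat.mod_eq_of_lt hd', Nat.add_comm]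

-- total = product of lengths
lemma total_concat (ls : List (List String)) (l : List String) :
    (((ls ++ [l]).map List.length).foldl (· * ·) 1)
      = ((ls.map List.length).foldl (· * ·) 1) * l.length := by
  simp [List.foldl_append]

-- the core: index decoding enumerates pyProduct
lemma decode_eq_pyProduct (ls : List (List String)) :
    (List.range ((ls.map List.length).foldl (· * ·) 1)).map
        (fun i => pvDecode (ls.map (fun l => (l, l.length))) i)
      = pyProduct ls := by
  induction ls using List.reverseRecOn with
  | nil =>
    simp [List.range_succ, pvDecode, pyProduct]
  | append_singleton ls l ih =>
    rw [total_concat, pyProduct_concat, ← ih]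
    have : ∀ i, pvDecode ((ls ++ [l]).map (fun l' => (l', l'.length))) i
        = (fun q d => pvDecode (ls.map (fun l' => (l', l'.length))) q ++ [l.getD d ""])
            (i / l.length) (i % l.length) := fun i => pvDecode_concat ls l i
    simp only [this]
    rw [range_mul_decode ((ls.map List.length).foldl (· * ·) 1) l.length
          (fun q d => pvDecode (ls.map (fun l' => (l', l'.length))) q ++ [l.getD d ""])]
    simp only [List.flatMap_map]
    refine List.flatMap_congr ?_
    intro q _
    rw [show (fun d => pvDecode (ls.map (fun l' => (l', l'.length))) q ++ [l.getD d ""])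
          = ((fun k => pvDecode (ls.map (fun l' => (l', l'.length))) q ++ [k])
              ∘ (fun d => l.getD d "")) from rfl,
        ← List.map_map, map_getD_range]

-- ===== VERDICT (by name: the statement is the Claim_ definition above) =====
theorem getChlids_spec : Claim_equal_getChlids := by
  intro po _
  show getChlids po = getChlids_alt po
  unfold getChlids getChlids_alt
  rw [PySem.List.foldl_append_singleton_eq_map (fun e : List String => e), mylist_eq]
  simp only [List.nil_append, List.map_id', zip_lengths]
  exact (decode_eq_pyProduct (po.map (fun o => (PySem.Dict.ofList o).keys))).symm
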